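-- pv_equiv track=rewrite | github.com/Soon607/Python_Basic | 비트코딩(기초다지기)/215(function).py | allnum
-- ===== SOURCE A (Python) =====
-- def allnum(n):
--     for i in range(0,10):
--         case=0
--         num=n
--         while num!=0:  #9614308527
--             if num%10==i:
--                 case+=1
--             num=num//10
--         if case!=1:   #중복되었는지 확인
--             return False
--     return True
-- ===== SOURCE B (Python) =====
-- def allnum(n):
--     counts = [0] * 10
--     num = n
--     while num != 0:
--         counts[num % 10] += 1
--         num = num // 10
--     for c in counts:
--         if c != 1:
--             return False
--     return True
-- ===== Notes on version B (the rewrite author's own statement) =====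
-- stated objective: alternative
-- what changed: B extracts the digits in a single pass into a ten-slot count table and then checks every count equals one, instead of A's re-scanning all digits of n separately for each of the ten digit values.
import Mathlib
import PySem

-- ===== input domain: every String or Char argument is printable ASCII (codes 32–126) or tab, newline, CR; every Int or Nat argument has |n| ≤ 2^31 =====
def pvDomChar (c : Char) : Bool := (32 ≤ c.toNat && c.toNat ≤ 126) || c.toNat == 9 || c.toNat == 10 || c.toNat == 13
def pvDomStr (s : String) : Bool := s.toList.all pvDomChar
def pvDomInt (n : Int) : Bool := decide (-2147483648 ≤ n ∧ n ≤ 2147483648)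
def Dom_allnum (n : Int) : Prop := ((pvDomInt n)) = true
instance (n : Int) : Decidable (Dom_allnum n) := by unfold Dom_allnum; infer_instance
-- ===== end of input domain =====

-- B builds a ten-slot digit-count table in a single pass over the digits and then checks every
-- count equals one, replacing A's ten separate digit scans.


-- ===== PORT A =====
-- A's inner 'while num != 0' loop; on num < 0 the Python loop never terminates
-- (excluded by Pre_allnum), so the port exits there only for totality.
def aCase (num i case_ : Int) : Int :=
  if num ≤ 0 then case_
  else aCase (PySem.Int.floordiv num 10) i
    (if PySem.Int.mod num 10 == i then case_ + 1 else case_)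
termination_by num.toNat
decreasing_by
  rename_i h
  have := PySem.Int.floordiv_eq_ediv_of_pos (a := num) (b := 10) (by omega)
  rw [this]; omega

-- the 'for i in range(0,10)' loop with early return False
def aFor (n : Int) : List Int → Bool
  | [] => true
  | i :: rest => if aCase n i 0 ≠ 1 then false else aFor n rest

def allnum (n : Int) : Bool := aFor n (PySem.List.pyRange 0 10 1)

-- ===== PORT B =====
-- B's digit-accumulation loop: counts[num % 10] += 1; num //= 10 (same exit guard, see aCase).
def bLoop (num : Int) (counts : List Int) : List Int :=
  if num ≤ 0 then counts
  else bLoop (PySem.Int.floordiv num 10)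
    (counts.set (PySem.Int.mod num 10).toNat
      (counts.getD (PySem.Int.mod num 10).toNat 0 + 1))
termination_by num.toNat
decreasing_by
  rename_i h
  have := PySem.Int.floordiv_eq_ediv_of_pos (a := num) (b := 10) (by omega)
  rw [this]; omega

def allnum_alt (n : Int) : Bool :=
  (bLoop n (List.replicate 10 0)).all (fun c => c == 1)

-- ===== PRECONDITION & SPEC =====
-- Pre_ excludes n < 0, on which A's 'while num != 0' with num //= 10 never terminates.
def Pre_allnum (n : Int) : Prop := 0 ≤ n
instance (n : Int) : Decidable (Pre_allnum n) := by unfold Pre_allnum; infer_instance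
def pvWitness_allnum : Int := 1234567890

def Spec_allnum (n : Int) (out : Bool) : Prop := out = allnum_alt n
instance (n : Int) (out : Bool) : Decidable (Spec_allnum n out) := by unfold Spec_allnum; infer_instance

-- ===== CLAIM (what is proved, stated in full; the proofs are below) =====
def Claim_equal_allnum : Prop := ∀ (n : Int), Dom_allnum n → Pre_allnum n → Spec_allnum n (allnum n)

-- ===== LEMMAS AND PROOFS =====

theorem aCase_shift (m : Nat) (num i case_ : Int) (hm : num.toNat = m) :
    aCase num i case_ = case_ + aCase num i 0 := by
  induction m using Nat.strong_induction_on generalizing num case_ with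
  | _ m ih =>
    have e : ∀ c : Int, aCase num i c =
        if num ≤ 0 then c
        else aCase (PySem.Int.floordiv num 10) i
          (if PySem.Int.mod num 10 == i then c + 1 else c) := by
      intro c; rw [aCase]
    rw [e case_, e 0]
    by_cases h : num ≤ 0
    · simp [h]
    · simp only [if_neg h]
      have hdiv := PySem.Int.floordiv_eq_ediv_of_pos (a := num) (b := 10) (by omega)
      have hlt : (PySem.Int.floordiv num 10).toNat < m := by omega
      by_cases hc : (PySem.Int.mod num 10 == i) = true
      · simp only [if_pos hc]
        rw [ih _ hlt _ (case_ + 1) rfl, ih _ hlt _ (0 + 1) rfl]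
        ring
      · simp only [if_neg hc]
        rw [ih _ hlt _ case_ rfl]

-- digit count for digit value i
def dc (num i : Int) : Int := aCase num i 0

theorem bLoop_length (m : Nat) (num : Int) (counts : List Int) (hm : num.toNat = m) :
    (bLoop num counts).length = counts.length := by
  induction m using Nat.strong_induction_on generalizing num counts with
  | _ m ih =>
    rw [bLoop]
    by_cases h : num ≤ 0
    · simp [h]
    · simp only [if_neg h]
      have hdiv := PySem.Int.floordiv_eq_ediv_of_pos (a := num) (b := 10) (by omega)
      have hlt : (PySem.Int.floordiv num 10).toNat < m := by omega
      rw [ih _ hlt _ _ rfl]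
      simp

theorem getD_set_point (l : List Int) (d k : Nat) (v : Int) (hd : d < l.length) :
    (l.set d v).getD k 0 = if d = k then v else l.getD k 0 := by
  by_cases he : d = k
  · subst he; simp [List.getD, hd]
  · simp [List.getD, he]

theorem bLoop_getD (m : Nat) (num : Int) (counts : List Int)
    (hm : num.toNat = m) (hlen : counts.length = 10) (k : Nat) (hk : k < 10) :
    (bLoop num counts).getD k 0 = counts.getD k 0 + dc num (k : Int) := by
  induction m using Nat.strong_induction_on generalizing num counts with
  | _ m ih =>
    have eb : bLoop num counts =
        if num ≤ 0 then counts
        else bLoop (PySem.Int.floordiv num 10)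
          (counts.set (PySem.Int.mod num 10).toNat
            (counts.getD (PySem.Int.mod num 10).toNat 0 + 1)) := by
      rw [bLoop]
    have ea : dc num (k : Int) =
        if num ≤ 0 then 0
        else aCase (PySem.Int.floordiv num 10) (k : Int)
          (if PySem.Int.mod num 10 == (k : Int) then 1 else 0) := by
      unfold dc; rw [aCase]; split <;> simp
    rw [eb, ea]
    by_cases h : num ≤ 0
    · simp [h]
    · simp only [if_neg h]
      have hpos : 0 < num := by omega
      have hdiv := PySem.Int.floordiv_eq_ediv_of_pos (a := num) (b := 10) (by omega)
      have hmod := PySem.Int.mod_eq_emod_of_pos (a := num) (b := 10) (by omega)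
      have hmodlt : (PySem.Int.mod num 10).toNat < 10 := by rw [hmod]; omega
      have hmodnn : 0 ≤ PySem.Int.mod num 10 := by omega
      have hlt : (PySem.Int.floordiv num 10).toNat < m := by omega
      have hlen' : (counts.set (PySem.Int.mod num 10).toNat
          (counts.getD (PySem.Int.mod num 10).toNat 0 + 1)).length = 10 := by
        simp [hlen]
      rw [ih _ hlt _ _ rfl hlen']
      rw [aCase_shift (PySem.Int.floordiv num 10).toNat _ _ _ rfl]
      have hset : (counts.set (PySem.Int.mod num 10).toNat
          (counts.getD (PySem.Int.mod num 10).toNat 0 + 1)).getD k 0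
          = counts.getD k 0 + (if (PySem.Int.mod num 10).toNat = k then 1 else 0) := by
        rw [getD_set_point counts _ k _ (by omega)]
        by_cases he : (PySem.Int.mod num 10).toNat = k
        · rw [he, if_pos rfl, if_pos rfl]
        · rw [if_neg he, if_neg he]; ring
      rw [hset]
      unfold dc
      by_cases he : (PySem.Int.mod num 10).toNat = k
      · have hq : (PySem.Int.mod num 10 == (k : Int)) = true := by
          have h2 : PySem.Int.mod num 10 = (k : Int) := by omega
          rw [h2]; simp
        rw [if_pos he, if_pos hq]; ring
      · have hq : (PySem.Int.mod num 10 == (k : Int)) = false := by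
          have h2 : PySem.Int.mod num 10 ≠ (k : Int) := by omega
          simpa using h2
        rw [if_neg he, hq]
        simp only [Bool.false_eq_true, if_false]
        ring

theorem aFor_all (n : Int) (l : List Int) :
    aFor n l = l.all (fun i => dc n i == 1) := by
  induction l with
  | nil => rfl
  | cons i rest ih =>
    show (if aCase n i 0 ≠ 1 then false else aFor n rest) = _
    rw [List.all_cons, ih]
    by_cases h : dc n i = 1 <;> simp_all [dc]

-- ===== VERDICT (by name: the statement is the Claim_ definition above) =====
theorem allnum_spec : Claim_equal_allnum := by
  intro n _ hn
  unfold Spec_allnum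
  have hlen : (bLoop n (List.replicate 10 0)).length = 10 := by
    rw [bLoop_length n.toNat n _ rfl]; rfl
  have hget : ∀ k : Nat, k < 10 →
      (bLoop n (List.replicate 10 0)).getD k 0 = dc n (k : Int) := by
    intro k hk
    rw [bLoop_getD n.toNat n _ rfl (by rfl) k hk]
    have : (List.replicate 10 (0:Int)).getD k 0 = 0 := by
      interval_cases k <;> rfl
    rw [this]; ring
  have hlist : bLoop n (List.replicate 10 0)
      = [dc n 0, dc n 1, dc n 2, dc n 3, dc n 4, dc n 5, dc n 6, dc n 7, dc n 8, dc n 9] := by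
    apply List.ext_getElem (by rw [hlen]; rfl)
    intro i h1 h2
    have hi : i < 10 := by
      rw [hlen] at h1; exact h1
    have hg := hget i hi
    rw [List.getD_eq_getElem _ _ (by omega)] at hg
    rw [hg]
    interval_cases i <;> norm_num
  have hrange : PySem.List.pyRange 0 10 1 = [0,1,2,3,4,5,6,7,8,9] := by decide
  rw [allnum, allnum_alt, hrange, hlist, aFor_all]
  simp [List.all_cons, dc]
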